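-- pv_equiv track=rewrite | github.com/kapilparab/HackerRank-Solutions-Python | Data Structures/Jesse-And-Cookies.py | cookies
-- ===== SOURCE A (Python) =====
-- from heapq import heappop, heappush, heapify
--
-- def cookies(k, A):
--
--     heapify(A) # Heapify the list
--     num_ops = 0 # Num of operations performed
--
--     try:
--         while A[0] < k: # While the root is less than K
--             num_ops += 1
--             c1 = heappop(A) # Pop the two smallest elements from the heap
--             c2 = heappop(A)
--             newCookie = (1 * c1) + (2 * c2) # Calculate new sweetness
--             heappush(A, newCookie) # Push the new cookie into the heap
--
--         return num_ops
--     except: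
--         return -1
-- ===== SOURCE B (Python) =====
-- from bisect import insort
--
-- def cookies(k, A):
--     # Return-value equivalent to A; unlike A it does not mutate the caller's list.
--     s = sorted(A)
--     i = 0  # everything before index i has been consumed; s[i:] stays sorted
--     ops = 0
--     while True:
--         if i >= len(s):
--             return -1
--         if s[i] >= k:
--             return ops
--         if i + 1 >= len(s):
--             return -1
--         c1 = s[i]
--         c2 = s[i + 1]
--         i += 2
--         insort(s, c1 + 2 * c2, lo=i)
--         ops += 1
-- ===== Notes on version B (the rewrite author's own statement) =====
-- stated objective: idiomatic
-- what changed: Replaces the heap (heapify/heappop/heappush) and the catch-all try/except by a sorted list consumed from the front (an index past the consumed prefix) with bisect.insort into the live suffix and explicit emptiness/length checks; B also leaves the caller's list unmutated, whereas A heapifies it in place (return values proved equal).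
import Mathlib
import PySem

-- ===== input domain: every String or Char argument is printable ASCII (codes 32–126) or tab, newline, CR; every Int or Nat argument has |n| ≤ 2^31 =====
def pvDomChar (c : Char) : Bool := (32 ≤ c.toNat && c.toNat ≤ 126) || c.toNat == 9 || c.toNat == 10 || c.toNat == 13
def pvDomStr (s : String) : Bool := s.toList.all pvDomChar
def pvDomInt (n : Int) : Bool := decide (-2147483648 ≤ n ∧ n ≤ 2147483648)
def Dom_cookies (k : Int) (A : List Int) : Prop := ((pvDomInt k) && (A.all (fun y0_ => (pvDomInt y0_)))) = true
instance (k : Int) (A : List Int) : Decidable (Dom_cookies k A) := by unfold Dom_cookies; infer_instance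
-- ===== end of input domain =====

-- B replaces A's heap by a sorted list kept ordered with an insertion (bisect.insort);
-- equivalence is about the RETURN value only (A mutates its argument in place, B does not).

-- ===== PORT A =====
-- heapq is ported by its contract: after heapify, A[0] is the minimum of the list,
-- heappop removes and returns the minimum (one occurrence), heappush adds an element.
-- The try/except returning -1 corresponds to the `none` (IndexError) branches.
def cookiesGo (k : Int) (h : List Int) (n : Int) : Int :=
  match hm : PySem.List.min? h (fun x => x) with
  | none => -1                           -- A[0] raises IndexError → except → -1
  | some c1 =>
    if c1 < k then
      match hm2 : PySem.List.min? (h.erase c1) (fun x => x) with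
      | none => -1                       -- second heappop raises → except → -1
      | some c2 =>
        cookiesGo k ((1 * c1 + 2 * c2) :: (h.erase c1).erase c2) (n + 1)
    else n
termination_by h.length
decreasing_by
  have h1 : c1 ∈ h := PySem.List.min?_mem hm
  have h2 : c2 ∈ h.erase c1 := PySem.List.min?_mem hm2
  have e1 := List.length_erase_of_mem h1
  have e2 := List.length_erase_of_mem h2
  have p1 : 0 < h.length := List.length_pos_of_mem h1
  have p2 : 0 < (h.erase c1).length := List.length_pos_of_mem h2
  simp only [List.length_cons]
  omega

def cookies (k : Int) (A : List Int) : Int := cookiesGo k A 0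

-- ===== PORT B =====
-- B keeps a sorted list and an index i past the consumed prefix; the Lean state is the
-- still-live suffix s[i:] as a list (advancing i = dropping the head).
-- bisect.insort(s, v, lo=i): insert v into the live suffix after all elements ≤ v (insort_right)
def insortB (v : Int) : List Int → List Int
  | [] => [v]
  | x :: xs => if v < x then v :: x :: xs else x :: insortB v xs

theorem insortB_length (v : Int) (s : List Int) : (insortB v s).length = s.length + 1 := by
  induction s with
  | nil => rfl
  | cons x xs ih => simp only [insortB]; split; repeat simp [ih]

def cookiesAltGo (k : Int) (s : List Int) (n : Int) : Int :=
  match s with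
  | [] => -1
  | [x] => if x < k then -1 else n
  | x :: y :: rest =>
    if x < k then cookiesAltGo k (insortB (x + 2 * y) rest) (n + 1) else n
termination_by s.length
decreasing_by
  simp [insortB_length]

def cookies_alt (k : Int) (A : List Int) : Int :=
  cookiesAltGo k (PySem.List.sorted A (fun x => x) false) 0

-- ===== PRECONDITION & SPEC =====
def Spec_cookies (k : Int) (A : List Int) (out : Int) : Prop := out = cookies_alt k A
instance (k : Int) (A : List Int) (out : Int) : Decidable (Spec_cookies k A out) := by unfold Spec_cookies; infer_instance

-- ===== CLAIM (what is proved, stated in full; the proofs are below) =====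
def Claim_equal_cookies : Prop := ∀ (k : Int) (A : List Int), Dom_cookies k A → Spec_cookies k A (cookies k A)

-- ===== LEMMAS AND PROOFS =====

theorem mem_insortB (y v : Int) (s : List Int) : y ∈ insortB v s ↔ y = v ∨ y ∈ s := by
  induction s with
  | nil => simp [insortB]
  | cons x xs ih => simp only [insortB]; split; repeat simp [ih] <;> tauto

theorem insortB_perm (v : Int) (s : List Int) : (insortB v s).Perm (v :: s) := by
  induction s with
  | nil => simp [insortB]
  | cons x xs ih =>
    simp only [insortB]; split
    · exact List.Perm.refl _
    · exact (ih.cons x).trans (List.Perm.swap v x xs)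

theorem insortB_pairwise (v : Int) (s : List Int) (hs : s.Pairwise (· ≤ ·)) :
    (insortB v s).Pairwise (· ≤ ·) := by
  induction s with
  | nil => simp [insortB]
  | cons x xs ih =>
    rcases List.pairwise_cons.mp hs with ⟨hx, hxs⟩
    simp only [insortB]; split
    · rename_i hv
      refine List.pairwise_cons.mpr ⟨?_, hs⟩
      intro y hy
      rcases List.mem_cons.mp hy with rfl | hy
      · exact le_of_lt hv
      · exact le_trans (le_of_lt hv) (hx y hy)
    · rename_i hv
      refine List.pairwise_cons.mpr ⟨?_, ih hxs⟩
      intro y hy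
      rcases (mem_insortB y v xs).mp hy with rfl | hy
      · omega
      · exact hx y hy

-- sorted (v :: l) = insort v (sorted l)
theorem sorted_cons_eq_insortB (v : Int) (l : List Int) :
    PySem.List.sorted (v :: l) (fun x => x) false = insortB v (PySem.List.sorted l (fun x => x) false) := by
  have hp : (insortB v (PySem.List.sorted l (fun x => x) false)).Perm (v :: l) :=
    (insortB_perm v _).trans ((PySem.List.sorted_perm l (fun x => x) false).cons v)
  have hpw : (insortB v (PySem.List.sorted l (fun x => x) false)).Pairwise (· ≤ ·) :=
    insortB_pairwise v _ (PySem.List.sorted_pairwise l (fun x => x))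
  exact PySem.List.sorted_id_eq_of_perm_of_pairwise _ _ hp hpw

-- the head of the sorted list is exactly Python's min of the list
theorem min?_eq_head_sorted (h : List Int) (m : Int) (t : List Int)
    (hs : PySem.List.sorted h (fun x => x) false = m :: t) :
    PySem.List.min? h (fun x => x) = some m := by
  have hmem : m ∈ h := by
    have := PySem.List.sorted_perm h (fun x => x) false
    rw [hs] at this
    exact this.mem_iff.mp (List.mem_cons_self ..)
  match hmin : PySem.List.min? h (fun x => x) with
  | none =>
    rw [PySem.List.min?_eq_none_iff] at hmin
    simp [hmin] at hmem
  | some c =>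
    have hc : c ∈ h := PySem.List.min?_mem hmin
    have h1 : c ≤ m := PySem.List.min?_isMin hmin m hmem
    have h2 : m ≤ c := PySem.List.key_head_sorted_le h (fun x => x) hs c hc
    rw [le_antisymm h1 h2]

-- erasing the minimum corresponds to dropping the head of the sorted list
theorem sorted_erase_head (h : List Int) (m : Int) (t : List Int)
    (hs : PySem.List.sorted h (fun x => x) false = m :: t) :
    PySem.List.sorted (h.erase m) (fun x => x) false = t := by
  have hperm : (h.erase m).Perm ((m :: t).erase m) := by
    have := (PySem.List.sorted_perm h (fun x => x) false).symm
    rw [hs] at this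
    exact ((this.erase m).symm).symm
  simp only [List.erase_cons_head] at hperm
  have hpw : t.Pairwise (· ≤ ·) := by
    have := PySem.List.sorted_pairwise h (fun x => x)
    rw [hs] at this
    exact (List.pairwise_cons.mp this).2
  exact PySem.List.sorted_id_eq_of_perm_of_pairwise _ _ hperm.symm hpw

theorem go_eq (k : Int) (N : Nat) :
    ∀ (h : List Int) (n : Int), h.length ≤ N →
      cookiesGo k h n = cookiesAltGo k (PySem.List.sorted h (fun x => x) false) n := by
  induction N with
  | zero =>
    intro h n hlen
    have : h = [] := List.length_eq_zero_iff.mp (Nat.le_zero.mp hlen)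
    subst this
    have hnil : PySem.List.sorted ([] : List Int) (fun x => x) false = [] :=
      (PySem.List.sorted_eq_nil_iff ..).mpr rfl
    rw [hnil]
    simp [cookiesGo, cookiesAltGo, PySem.List.min?]
  | succ N ih =>
    intro h n hlen
    match hs : PySem.List.sorted h (fun x => x) false with
    | [] =>
      have : h = [] := (PySem.List.sorted_eq_nil_iff ..).mp hs
      subst this
      simp [cookiesGo, cookiesAltGo, PySem.List.min?]
    | [m] =>
      have hm := min?_eq_head_sorted h m [] hs
      have ht := sorted_erase_head h m [] hs
      rw [cookiesGo, hm]
      by_cases hk : m < k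
      · have : PySem.List.min? (h.erase m) (fun x => x) = none := by
          rw [PySem.List.min?_eq_none_iff, ← PySem.List.sorted_eq_nil_iff (h.erase m) (fun x => x) false]
          exact ht
        simp only [hk, if_pos]
        rw [this]
        split
        · simp [cookiesAltGo, hk]
        · rename_i c2 heq
          simp at heq
      · simp [cookiesAltGo, hk]
    | m :: c :: t =>
      have hm := min?_eq_head_sorted h m (c :: t) hs
      have ht : PySem.List.sorted (h.erase m) (fun x => x) false = c :: t :=
        sorted_erase_head h m (c :: t) hs
      have hc := min?_eq_head_sorted (h.erase m) c t ht
      have ht2 : PySem.List.sorted ((h.erase m).erase c) (fun x => x) false = t :=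
        sorted_erase_head (h.erase m) c t ht
      rw [cookiesGo, hm]
      by_cases hk : m < k
      · simp only [hk, if_pos]
        have hlen2 : ((1 * m + 2 * c) :: (h.erase m).erase c).length ≤ N := by
          have hmh : m ∈ h := PySem.List.min?_mem hm
          have hch : c ∈ h.erase m := PySem.List.min?_mem hc
          have e1 := List.length_erase_of_mem hmh
          have e2 := List.length_erase_of_mem hch
          have p1 : 0 < h.length := List.length_pos_of_mem hmh
          have p2 : 0 < (h.erase m).length := List.length_pos_of_mem hch
          simp only [List.length_cons]
          omega
        rw [hc]
        split
        · rename_i heq; exact absurd heq (by simp)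
        · rename_i c2 heq
          injection heq with heq; subst heq
          rw [ih _ (n + 1) hlen2, sorted_cons_eq_insortB, ht2]
          simp [cookiesAltGo, hk, one_mul]
      · simp [cookiesAltGo, hk]

-- ===== VERDICT (by name: the statement is the Claim_ definition above) =====
theorem cookies_spec : Claim_equal_cookies := by
  intro k A _
  unfold Spec_cookies cookies cookies_alt
  exact go_eq k A.length A 0 le_rfl
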